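-- pv_equiv track=rewrite | github.com/lehippie/advent-of-code | day04/password.py | validity
-- ===== SOURCE A (Python) =====
-- def validity(password):
--     """Determine validity of Venus fuel depot password."""
--     password = [int(d) for d in str(password)]
--     if len(password) != 6:
--         return False
--     if sorted(password) != password:
--         return False
--     double = False
--     for d1, d2 in zip(password[:-1], password[1:]):
--         if d1 == d2:
--             double = True
--     return double
-- ===== SOURCE B (Python) =====
-- def validity(password):
--     """Determine validity of Venus fuel depot password."""
--     digits = [int(d) for d in str(password)]
--     if len(digits) != 6:
--         return False
--     double = False
--     for d1, d2 in zip(digits, digits[1:]):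
--         if d1 > d2:
--             return False
--         if d1 == d2:
--             double = True
--     return double
-- ===== Notes on version B (the rewrite author's own statement) =====
-- stated objective: simpler
-- what changed: Replaces building a sorted copy and comparing it to the list (plus a separate zip pass for the double) by one linear scan over adjacent digit pairs that rejects on the first descent and sets the double flag inline.
import Mathlib
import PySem

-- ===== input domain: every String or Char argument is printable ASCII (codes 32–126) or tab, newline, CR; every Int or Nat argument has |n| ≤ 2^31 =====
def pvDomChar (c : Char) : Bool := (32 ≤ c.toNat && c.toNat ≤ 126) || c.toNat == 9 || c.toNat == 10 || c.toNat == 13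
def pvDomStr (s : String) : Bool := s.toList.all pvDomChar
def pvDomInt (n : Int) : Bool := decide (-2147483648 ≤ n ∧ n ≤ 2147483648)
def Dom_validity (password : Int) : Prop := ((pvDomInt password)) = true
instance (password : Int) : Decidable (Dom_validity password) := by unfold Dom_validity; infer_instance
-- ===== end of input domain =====

-- B replaces A's sorted-copy comparison (plus a second zip pass for the double) by one
-- linear scan over adjacent digit pairs: reject on the first descent, flag equality inline.


-- ===== PORT A =====
def validity (password : Int) : Bool :=
  -- [int(d) for d in str(password)]; ofChars? = none is Python's ValueError, excluded by Pre_
  let pw := (PySem.Int.toChars password).map (fun c => (PySem.Int.ofChars? [c]).getD 0)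
  if pw.length ≠ 6 then false
  else if PySem.List.sorted pw (fun x => x) false ≠ pw then false
  else
    ((PySem.List.slice pw none (some (-1))).zip (PySem.List.slice pw (some 1) none)).foldl
      (fun double p => if p.1 == p.2 then true else double) false

-- ===== PORT B =====
-- the for-loop over zip(digits, digits[1:]) with early return, as recursion on the digit list
def altScan : List Int → Bool → Bool
  | d1 :: d2 :: rest, double =>
      if d1 > d2 then false
      else altScan (d2 :: rest) (if d1 == d2 then true else double)
  | _, double => double

def validity_alt (password : Int) : Bool :=
  let digits := (PySem.Int.toChars password).map (fun c => (PySem.Int.ofChars? [c]).getD 0)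
  if digits.length ≠ 6 then false
  else altScan digits false

-- ===== PRECONDITION & SPEC =====
-- Pre_ excludes negative passwords: int('-') makes Python A (and B) raise ValueError there.
def Pre_validity (password : Int) : Prop := 0 ≤ password
instance (password : Int) : Decidable (Pre_validity password) := by unfold Pre_validity; infer_instance
def pvWitness_validity : Int := (123456)

def Spec_validity (password : Int) (out : Bool) : Prop := out = validity_alt password
instance (password : Int) (out : Bool) : Decidable (Spec_validity password out) := by unfold Spec_validity; infer_instance

-- ===== CLAIM (what is proved, stated in full; the proofs are below) =====
def Claim_equal_validity : Prop := ∀ (password : Int), Dom_validity password → Pre_validity password → Spec_validity password (validity password)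

-- ===== LEMMAS AND PROOFS =====

-- adjacent-equality of some pair, A's fold's result
def anyAdjEq : List Int → Bool
  | a :: b :: r => (a == b) || anyAdjEq (b :: r)
  | _ => false

theorem sorted_id_eq_iff_chain' (l : List Int) :
    PySem.List.sorted l (fun x => x) false = l ↔ l.IsChain (· ≤ ·) := by
  constructor
  · intro h
    have := PySem.List.sorted_pairwise l (fun x => x)
    rw [h] at this
    exact List.Pairwise.isChain this
  · intro h
    have hp : l.Pairwise (· ≤ ·) := List.IsChain.pairwise h
    exact PySem.List.sorted_eq_self_of_pairwise l (fun x => x) hp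

theorem foldzip_eq_anyAdjEq (l : List Int) (dbl : Bool) :
    ((l.dropLast).zip l.tail).foldl
      (fun double p => if p.1 == p.2 then true else double) dbl = (dbl || anyAdjEq l) := by
  induction l generalizing dbl with
  | nil => simp [anyAdjEq]
  | cons a t ih =>
    cases t with
    | nil => simp [anyAdjEq]
    | cons b r =>
      simp only [List.dropLast_cons₂, List.zip_cons_cons, List.tail_cons, List.foldl_cons]
      rw [show (b :: r).dropLast.zip r = (b :: r).dropLast.zip (b :: r).tail from rfl] at *
      rw [ih]
      by_cases hab : a = b
      · simp [anyAdjEq, hab]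
      · simp [anyAdjEq, beq_false_of_ne hab]

theorem altScan_of_chain (l : List Int) (dbl : Bool) (h : l.IsChain (· ≤ ·)) :
    altScan l dbl = (dbl || anyAdjEq l) := by
  induction l generalizing dbl with
  | nil => simp [altScan, anyAdjEq]
  | cons a t ih =>
    cases t with
    | nil => simp [altScan, anyAdjEq]
    | cons b r =>
      rw [List.isChain_cons_cons] at h
      have hnot : ¬ a > b := not_lt.mpr h.1
      rw [altScan, if_neg hnot, ih _ h.2]
      by_cases hab : a = b
      · simp [anyAdjEq, hab]
      · simp [anyAdjEq, beq_false_of_ne hab]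

theorem altScan_of_not_chain (l : List Int) (dbl : Bool) (h : ¬ l.IsChain (· ≤ ·)) :
    altScan l dbl = false := by
  induction l generalizing dbl with
  | nil => exact absurd List.IsChain.nil h
  | cons a t ih =>
    cases t with
    | nil => exact absurd (List.IsChain.singleton a) h
    | cons b r =>
      rw [List.isChain_cons_cons] at h
      rw [altScan]
      by_cases hab : a > b
      · rw [if_pos hab]
      · rw [if_neg hab]
        exact ih _ (fun hc => h ⟨not_lt.mp hab, hc⟩)

theorem core_eq (l : List Int) :
    (if PySem.List.sorted l (fun x => x) false ≠ l then false
     else ((PySem.List.slice l none (some (-1))).zip (PySem.List.slice l (some 1) none)).foldl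
       (fun double p => if p.1 == p.2 then true else double) false)
    = altScan l false := by
  rw [PySem.List.slice_to_neg_one, PySem.List.slice_from_one]
  by_cases hs : PySem.List.sorted l (fun x => x) false = l
  · have hc := (sorted_id_eq_iff_chain' l).mp hs
    rw [if_neg (by simpa using hs), foldzip_eq_anyAdjEq, altScan_of_chain l false hc]
  · have hc := fun h => hs ((sorted_id_eq_iff_chain' l).mpr h)
    rw [if_pos (by simpa using hs), altScan_of_not_chain l false hc]

-- ===== VERDICT (by name: the statement is the Claim_ definition above) =====
theorem validity_spec : Claim_equal_validity := by
  intro password _ _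
  unfold Spec_validity validity validity_alt
  set pw := (PySem.Int.toChars password).map (fun c => (PySem.Int.ofChars? [c]).getD 0) with hpw
  by_cases hl : pw.length = 6
  · simp only [hl, ne_eq, not_true_eq_false, if_false]
    simpa using core_eq pw
  · simp [hl]
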